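-- pv_equiv track=rewrite | github.com/kowyo/uvup | src/uvup/__init__.py | parse_version_spec
-- ===== SOURCE A (Python) =====
-- def parse_version_spec(spec: str) -> tuple[str, str] | None:
--     """Parse version specifier to extract operator and version.
--
--     Args:
--         spec: Version specifier like ">=2.0.0" or "==1.0.0"
--
--     Returns:
--         Tuple of (operator, version) or None if not parseable
--     """
--     if not spec:
--         return None
--
--     # Common version specifiers
--     for op in [">=", "<=", "==", "!=", "~=", ">", "<", "==="]:
--         if spec.startswith(op):
--             version = spec[len(op) :].strip()
--             return op, version
--
--     return None
-- ===== SOURCE B (Python) =====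
-- def parse_version_spec(spec: str) -> tuple[str, str] | None:
--     """Character-dispatch: inspect the first one/two characters directly instead
--     of scanning a list of operators."""
--     if not spec:
--         return None
--     c = spec[0]
--     if c not in "><=!~":
--         return None
--     two = spec[:2]
--     if two in (">=", "<=", "==", "!=", "~="):
--         return two, spec[2:].strip()
--     if c in "><":
--         return c, spec[1:].strip()
--     return None
-- ===== Notes on version B (the rewrite author's own statement) =====
-- stated objective: alternative
-- what changed: A scans an 8-element operator list calling startswith on each; B does a direct character dispatch: it inspects the first character, tests the two-character prefix against the five two-char operators, and falls back to bare '>'/'<' - no operator list and no scanning loop.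
import Mathlib
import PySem

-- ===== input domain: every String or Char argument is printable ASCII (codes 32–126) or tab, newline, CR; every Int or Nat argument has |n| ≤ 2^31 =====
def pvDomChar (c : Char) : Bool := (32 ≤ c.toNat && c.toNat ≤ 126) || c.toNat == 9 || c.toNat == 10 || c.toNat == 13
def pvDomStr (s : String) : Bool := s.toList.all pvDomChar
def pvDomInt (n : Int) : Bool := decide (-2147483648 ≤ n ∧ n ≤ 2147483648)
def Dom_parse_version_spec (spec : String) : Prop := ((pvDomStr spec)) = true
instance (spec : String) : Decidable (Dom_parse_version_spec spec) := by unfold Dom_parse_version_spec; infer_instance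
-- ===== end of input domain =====

-- B replaces A's scan over the operator list by a direct dispatch on the first one/two characters (objective: alternative; same cost).

-- ===== PORT A =====
-- A's literal operator list, in A's order
def pvOpsA : List (List Char) := [['>','='], ['<','='], ['=','='], ['!','='], ['~','='], ['>'], ['<'], ['=','=','=']]

-- 'for op in [...]: if spec.startswith(op): return op, spec[len(op):].strip()'
def pvLoopA (ops : List (List Char)) (s : List Char) : Option (String × String) :=
  match ops with
  | [] => none
  | op :: rest =>
    if PySem.Chars.startswith s op then
      some (String.ofList op, String.ofList (PySem.Chars.strip (PySem.List.slice s (some (op.length : Int)) none)))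
    else pvLoopA rest s

def parse_version_spec (spec : String) : Option (String × String) :=
  if spec.toList = [] then none
  else pvLoopA pvOpsA spec.toList

-- ===== PORT B =====
-- Source B: empty → None; first char not in "><=!~" → None; two-char operator prefix; else bare > or <
def parse_version_spec_alt (spec : String) : Option (String × String) :=
  match spec.toList with
  | [] => none
  | c :: rest =>
    if c ∈ (['>','<','=','!','~'] : List Char) then
      let two := PySem.List.slice (c :: rest) none (some 2)
      if two = ['>','='] ∨ two = ['<','='] ∨ two = ['=','='] ∨ two = ['!','='] ∨ two = ['~','='] then
        some (String.ofList two, String.ofList (PySem.Chars.strip (PySem.List.slice (c :: rest) (some 2) none)))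
      else if c = '>' ∨ c = '<' then
        some (String.ofList [c], String.ofList (PySem.Chars.strip (PySem.List.slice (c :: rest) (some 1) none)))
      else none
    else none

-- ===== PRECONDITION & SPEC =====
def Spec_parse_version_spec (spec : String) (out : Option (String × String)) : Prop := out = parse_version_spec_alt spec
instance (spec : String) (out : Option (String × String)) : Decidable (Spec_parse_version_spec spec out) := by unfold Spec_parse_version_spec; infer_instance

-- ===== CLAIM (what is proved, stated in full; the proofs are below) =====
def Claim_equal_parse_version_spec : Prop := ∀ (spec : String), Dom_parse_version_spec spec → Spec_parse_version_spec spec (parse_version_spec spec)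

-- ===== LEMMAS AND PROOFS =====
theorem pv_sw1 (c x : Char) (t : List Char) : PySem.Chars.startswith (c::t) [x] = decide (c = x) := by
  by_cases h : c = x
  · simp only [h, decide_true]
    exact (PySem.Chars.startswith_iff _ _).mpr (by simp)
  · simp only [h, decide_false, Bool.eq_false_iff, ne_eq, PySem.Chars.startswith_iff]
    simp [List.cons_prefix_cons, eq_comm, h]

theorem pv_sw2 (c d x y : Char) (t : List Char) :
    PySem.Chars.startswith (c::d::t) [x,y] = (decide (c = x) && decide (d = y)) := by
  by_cases h1 : c = x <;> by_cases h2 : d = y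
  · simp only [h1, h2, decide_true, Bool.and_self]
    exact (PySem.Chars.startswith_iff _ _).mpr (by simp [List.cons_prefix_cons])
  all_goals
    simp only [h1, h2, decide_true, decide_false, Bool.and_false, Bool.false_and,
      Bool.eq_false_iff, ne_eq, PySem.Chars.startswith_iff]
    simp [List.cons_prefix_cons, eq_comm, h1, h2]

theorem pv_sw2s (c x y : Char) : PySem.Chars.startswith [c] [x,y] = false := by
  simp only [Bool.eq_false_iff, ne_eq, PySem.Chars.startswith_iff]
  simp [List.cons_prefix_cons]

theorem pv_sw3 (c d x y z : Char) (t : List Char) (h : ¬(c = x ∧ d = y)) :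
    PySem.Chars.startswith (c::d::t) [x,y,z] = false := by
  simp only [Bool.eq_false_iff, ne_eq, PySem.Chars.startswith_iff]
  simp only [List.cons_prefix_cons]
  tauto

theorem pv_sw3s (c x y z : Char) : PySem.Chars.startswith [c] [x,y,z] = false := by
  simp only [Bool.eq_false_iff, ne_eq, PySem.Chars.startswith_iff]
  simp [List.cons_prefix_cons]

theorem pv_sl2 (x y : Char) (t : List Char) : PySem.List.slice (x::y::t) (some 2) none = t := by
  simp [pysem]

theorem pv_slt2 (x y : Char) (t : List Char) : PySem.List.slice (x::y::t) none (some 2) = [x,y] := by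
  simp [pysem]

theorem pv_slt2s (x : Char) : PySem.List.slice [x] none (some 2) = [x] := by
  simp [pysem]

theorem pv_main (spec : String) : parse_version_spec spec = parse_version_spec_alt spec := by
  unfold parse_version_spec parse_version_spec_alt
  cases h : spec.toList with
  | nil => simp
  | cons c rest =>
    simp only [reduceCtorEq, if_false]
    cases rest with
    | nil =>
      by_cases h1 : c = '>' <;> by_cases h2 : c = '<' <;> by_cases h3 : c = '=' <;>
        by_cases h4 : c = '!' <;> by_cases h5 : c = '~' <;>
        simp_all [pvLoopA, pvOpsA, pv_sw1, pv_sw2s, pv_sw3s, pv_slt2s]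
    | cons d rest' =>
      by_cases h1 : c = '>' <;> by_cases h2 : c = '<' <;> by_cases h3 : c = '=' <;>
        by_cases h4 : c = '!' <;> by_cases h5 : c = '~' <;> by_cases h6 : d = '=' <;>
        simp_all [pvLoopA, pvOpsA, pv_sw1, pv_sw2, pv_sw3, pv_sl2, pv_slt2]

-- ===== VERDICT (by name: the statement is the Claim_ definition above) =====
theorem parse_version_spec_spec : Claim_equal_parse_version_spec := by
  intro spec _
  unfold Spec_parse_version_spec
  exact pv_main spec
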